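-- pv_equiv track=rewrite | github.com/vncloudsco/splunk | lib/python2.7/site-packages/splunk/searchhelp/didYouMean.py | sortSuggestions
-- ===== SOURCE A (Python) =====
-- def sortSuggestions(command, suggestions):
--     ordered = []
--     # prefix = best matches
--     for s in suggestions:
--         if s.startswith(command):
--             ordered.append(s)
--     # subsearch(notprefix) = next best matches
--     for s in suggestions:
--         if command in s and not s.startswith(command):
--             ordered.append(s)
--     # rest
--     for s in suggestions:
--         if s not in ordered:
--             ordered.append(s)
--     return ordered
-- ===== SOURCE B (Python) =====
-- def sortSuggestions(command, suggestions):
--     prefix, sub, rest = [], [], []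
--     seen = set()
--     for s in suggestions:
--         if s.startswith(command):
--             prefix.append(s)
--         elif command in s:
--             sub.append(s)
--         elif s not in seen:
--             seen.add(s)
--             rest.append(s)
--     return prefix + sub + rest
-- ===== Notes on version B (the rewrite author's own statement) =====
-- stated objective: faster
-- what changed: Replaces A's three full passes (the last with an O(n) membership scan over the growing result list, making A quadratic) by a single pass that routes each suggestion into one of three buckets with if/elif/else, dedups the tail bucket with a hash set, and concatenates the buckets.
import Mathlib
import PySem

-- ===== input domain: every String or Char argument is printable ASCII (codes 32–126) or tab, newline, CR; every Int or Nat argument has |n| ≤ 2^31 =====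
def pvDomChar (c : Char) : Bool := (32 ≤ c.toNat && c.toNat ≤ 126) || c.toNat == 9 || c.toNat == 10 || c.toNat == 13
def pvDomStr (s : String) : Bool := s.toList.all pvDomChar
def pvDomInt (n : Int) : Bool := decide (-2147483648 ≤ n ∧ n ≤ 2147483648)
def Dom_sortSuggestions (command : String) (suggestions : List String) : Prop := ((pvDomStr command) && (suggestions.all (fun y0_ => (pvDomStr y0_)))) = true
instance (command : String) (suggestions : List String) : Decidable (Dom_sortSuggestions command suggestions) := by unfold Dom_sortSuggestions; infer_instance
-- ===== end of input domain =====

-- B makes one pass routing each suggestion into three buckets (prefix / substring / deduped rest)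
-- instead of A's three passes with a quadratic membership scan over the growing result.

-- ===== PORT A =====
def sortSuggestions (command : String) (suggestions : List String) : List String :=
  -- prefix = best matches
  let ordered1 := suggestions.foldl
    (fun acc s => if PySem.Str.startswith s command then acc ++ [s] else acc) []
  -- subsearch(notprefix) = next best matches
  let ordered2 := suggestions.foldl
    (fun acc s => if PySem.Str.isIn command s && !(PySem.Str.startswith s command) then acc ++ [s] else acc) ordered1
  -- rest ('if s not in ordered: ordered.append(s)')
  suggestions.foldl
    (fun acc s => if acc.contains s then acc else acc ++ [s]) ordered2

-- ===== PORT B =====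
-- one step of B's single loop over the 4-part state (prefix, sub, seen, rest)
def sortStep (command : String)
    (st : List String × List String × PySem.Set String × List String) (s : String) :
    List String × List String × PySem.Set String × List String :=
  match st with
  | (p, sb, seen, r) =>
    if PySem.Str.startswith s command then (p ++ [s], sb, seen, r)
    else if PySem.Str.isIn command s then (p, sb ++ [s], seen, r)
    else if PySem.Set.contains seen s then (p, sb, seen, r)
    else (p, sb, PySem.Set.add seen s, r ++ [s])

def sortSuggestions_alt (command : String) (suggestions : List String) : List String :=
  let t := suggestions.foldl (sortStep command) ([], [], PySem.Set.empty, [])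
  t.1 ++ t.2.1 ++ t.2.2.2

-- ===== PRECONDITION & SPEC =====
def Spec_sortSuggestions (command : String) (suggestions : List String) (out : List String) : Prop := out = sortSuggestions_alt command suggestions
instance (command : String) (suggestions : List String) (out : List String) : Decidable (Spec_sortSuggestions command suggestions out) := by unfold Spec_sortSuggestions; infer_instance

-- ===== CLAIM (what is proved, stated in full; the proofs are below) =====
def Claim_equal_sortSuggestions : Prop := ∀ (command : String) (suggestions : List String), Dom_sortSuggestions command suggestions → Spec_sortSuggestions command suggestions (sortSuggestions command suggestions)

-- ===== LEMMAS AND PROOFS =====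

-- a prefix of s is in particular a substring of s
theorem pv_sw_isIn (cmd s : String) (h : PySem.Str.startswith s cmd = true) :
    PySem.Str.isIn cmd s = true := by
  rw [PySem.Str.isIn_iff_infix]
  have hp : cmd.toList <+: s.toList := by
    rw [PySem.Str.startswith_eq, PySem.Chars.startswith_iff] at h
    exact h
  exact hp.isInfix

-- A's third loop: elements already present in `base` (all substring matches) are skipped,
-- so the loop only dedup-appends the non-substring elements after `base`.
theorem pv_a_third (cmd : String) (l : List String) (base r : List String)
    (h1 : ∀ s ∈ l, PySem.Str.isIn cmd s = true → s ∈ base)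
    (h2 : ∀ s ∈ base, PySem.Str.isIn cmd s = true) :
    l.foldl (fun acc s => if acc.contains s then acc else acc ++ [s]) (base ++ r)
      = base ++ (l.filter (fun s => !(PySem.Str.isIn cmd s))).foldl
          (fun acc s => if acc.contains s then acc else acc ++ [s]) r := by
  induction l generalizing r with
  | nil => simp
  | cons s t ih =>
    by_cases hin : PySem.Str.isIn cmd s = true
    · have hmem : s ∈ base := h1 s (List.mem_cons_self) hin
      have hc : (base ++ r).contains s = true := by
        simp [List.contains_eq_mem]; exact Or.inl hmem
      simp only [List.foldl_cons, List.filter_cons, hin, hc]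
      simp only [if_true]
      exact ih r (fun x hx => h1 x (List.mem_cons_of_mem _ hx))
    · have hnb : s ∉ base := fun hmem => hin (h2 s hmem)
      have hin' : PySem.Str.isIn cmd s = false := by simpa using hin
      have hc : (base ++ r).contains s = r.contains s := by
        simp [List.contains_eq_mem, hnb]
      simp only [List.foldl_cons, List.filter_cons, hin', hc, Bool.not_false, if_true]
      by_cases hr : r.contains s = true
      · simp only [hr, if_true]
        exact ih r (fun x hx => h1 x (List.mem_cons_of_mem _ hx))
      · have hr' : r.contains s = false := by simpa using hr
        simp only [hr', Bool.false_eq_true, if_false]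
        rw [List.append_assoc]
        exact ih (r ++ [s]) (fun x hx => h1 x (List.mem_cons_of_mem _ hx))

-- B's single loop splits into the three independent buckets
theorem pv_b_loop (cmd : String) (l : List String) (p sb r : List String)
    (seen : PySem.Set String)
    (hseen : ∀ x, PySem.Set.contains seen x = r.contains x) :
    l.foldl (sortStep cmd) (p, sb, seen, r)
      = (p ++ l.filter (fun s => PySem.Str.startswith s cmd),
         sb ++ l.filter (fun s => !(PySem.Str.startswith s cmd) && PySem.Str.isIn cmd s),
         (l.filter (fun s => !(PySem.Str.startswith s cmd) && !(PySem.Str.isIn cmd s))).foldl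
            PySem.Set.add seen,
         (l.filter (fun s => !(PySem.Str.startswith s cmd) && !(PySem.Str.isIn cmd s))).foldl
            (fun acc s => if acc.contains s then acc else acc ++ [s]) r) := by
  induction l generalizing p sb seen r with
  | nil => simp
  | cons s t ih =>
    by_cases hsw : PySem.Str.startswith s cmd = true
    · simp only [List.foldl_cons, List.filter_cons, hsw, sortStep, if_true,
        Bool.not_true, Bool.false_and]
      rw [ih (p ++ [s]) sb r seen hseen]
      simp
    · have hsw' : PySem.Str.startswith s cmd = false := by simpa using hsw
      by_cases hin : PySem.Str.isIn cmd s = true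
      · simp only [List.foldl_cons, List.filter_cons, hsw', hin, sortStep,
          Bool.false_eq_true, if_false, if_true, Bool.not_false, Bool.true_and,
          Bool.not_true, Bool.and_false]
        rw [ih p (sb ++ [s]) r seen hseen]
        simp
      · have hin' : PySem.Str.isIn cmd s = false := by simpa using hin
        by_cases hr : r.contains s = true
        · have hcs : PySem.Set.contains seen s = true := by rw [hseen]; exact hr
          have hm : s ∈ (seen : List String) := by
            simpa [PySem.Set.contains_eq_listContains, List.contains_eq_mem] using hcs
          have hadd : PySem.Set.add seen s = seen := by simp [PySem.Set.add, hm]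
          have hrm : s ∈ r := by simpa [List.contains_eq_mem] using hr
          simp only [List.foldl_cons, List.filter_cons, hsw', hin', sortStep,
            Bool.false_eq_true, if_false, hcs, if_true, Bool.not_false, Bool.true_and]
          rw [ih p sb r seen hseen]
          simp [hadd, hrm]
        · have hr' : r.contains s = false := by simpa using hr
          have hcs : PySem.Set.contains seen s = false := by rw [hseen]; exact hr'
          have hm : s ∉ (seen : List String) := by
            simpa [PySem.Set.contains_eq_listContains, List.contains_eq_mem] using hcs
          have hadd : PySem.Set.add seen s = seen ++ [s] := by simp [PySem.Set.add, hm]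
          have hrm : s ∉ r := by simpa [List.contains_eq_mem] using hr'
          have hseen' : ∀ x, PySem.Set.contains (PySem.Set.add seen s) x = (r ++ [s]).contains x := by
            intro x
            have hx : x ∈ (seen : List String) ↔ x ∈ r := by
              have h := hseen x
              simpa only [PySem.Set.contains_eq_listContains, List.contains_eq_mem,
                decide_eq_decide] using h
            rw [hadd]
            simp only [PySem.Set.contains_eq_listContains, List.contains_eq_mem,
              List.mem_append, hx]
          simp only [List.foldl_cons, List.filter_cons, hsw', hin', sortStep,
            Bool.false_eq_true, if_false, hcs, Bool.not_false, Bool.true_and]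
          rw [ih p sb (r ++ [s]) (PySem.Set.add seen s) hseen']
          simp [hadd, hrm]

-- ===== VERDICT (by name: the statement is the Claim_ definition above) =====
theorem sortSuggestions_spec : Claim_equal_sortSuggestions := by
  intro cmd l _
  unfold Spec_sortSuggestions
  simp only [sortSuggestions, sortSuggestions_alt,
    PySem.List.foldl_append_if_eq_filter, List.nil_append]
  set P := fun s => PySem.Str.startswith s cmd with hP
  set base := l.filter P ++ l.filter (fun s => PySem.Str.isIn cmd s && !(P s)) with hbase
  have hthird := pv_a_third cmd l base []
    (by
      intro s hs hin
      by_cases hsw : P s = true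
      · exact List.mem_append_left _ (List.mem_filter.mpr ⟨hs, hsw⟩)
      · refine List.mem_append_right _ (List.mem_filter.mpr ⟨hs, ?_⟩)
        simp only [Bool.not_eq_true] at hsw
        rw [hin, hsw]; rfl)
    (by
      intro s hsmem
      rcases List.mem_append.mp hsmem with h | h
      · exact pv_sw_isIn cmd s (List.mem_filter.mp h).2
      · exact Bool.and_elim_left (List.mem_filter.mp h).2)
  rw [List.append_nil] at hthird
  rw [hthird]
  rw [pv_b_loop cmd l [] [] [] PySem.Set.empty (fun x => by
    simp [PySem.Set.empty])]
  simp only [List.nil_append, hbase]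
  -- align the three filter predicates
  have e1 : l.filter (fun s => PySem.Str.isIn cmd s && !(P s))
      = l.filter (fun s => !(P s) && PySem.Str.isIn cmd s) := by
    simp [Bool.and_comm]
  have e2 : l.filter (fun s => !(PySem.Str.isIn cmd s))
      = l.filter (fun s => !(P s) && !(PySem.Str.isIn cmd s)) := by
    apply List.filter_congr
    intro s _
    by_cases hin : PySem.Str.isIn cmd s = true
    · rw [hin]; simp
    · have hin' : PySem.Str.isIn cmd s = false := by simpa using hin
      have hsw : P s = false := by
        by_contra h
        exact hin (pv_sw_isIn cmd s (by simpa using h))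
      rw [hin', hsw]; rfl
  rw [e1, e2]
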